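-- pv_equiv track=rewrite | github.com/chrisvail/Project_Euler | Problem103take2.py | gen_disjoint_sets
-- ===== SOURCE A (Python) =====
-- def gen_disjoint_sets(numbers):
--     sets = [[[[0], [0], [0]]]]
--     # sets = [[[0, 0, 0]]]
--
--     for i in range(len(numbers)):
--         n = len(sets[i]) * 3
--         sets.append([])
--         for j in range(n):
--
--             a = [sets[i][j // 3][0][:], sets[i][j // 3][1][:], sets[i][j // 3][2][:] ]
--             # a = [sets[i][j // 3][0], sets[i][j // 3][1], sets[i][j // 3][2]]
--             if a[j % 3] == [0]:
--                 a[j % 3] = [numbers[i]]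
--             else:
--                 a[j % 3].append(numbers[i])
--
--             # a[j % 3] += numbers[i]
--
--             sets[i + 1].append(a)
--
--     return sets
-- ===== SOURCE B (Python) =====
-- def gen_disjoint_sets(numbers):
--     # Build each level directly: entry j of level k encodes an assignment of the
--     # first k numbers to the 3 subsets via j's base-3 digits (most significant
--     # digit = first number), with [0] standing for an empty subset.
--     out = []
--     for k in range(len(numbers) + 1):
--         level = []
--         for j in range(3 ** k):
--             entry = []
--             for s in range(3):
--                 subset = [numbers[i] for i in range(k) if j // 3 ** (k - 1 - i) % 3 == s]
--                 entry.append(subset if subset else [0])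
--             level.append(entry)
--         out.append(level)
--     return out
-- ===== Notes on version B (the rewrite author's own statement) =====
-- stated objective: alternative
-- what changed: B builds every level independently from the base-3 digits of each entry index (digit i of j selects the subset of numbers[i]) instead of A's copy-and-extend of the previous level.
-- intended difference: On lists where 0 occurs before the last element, A's empty-subset sentinel collides with a subset that actually contains the number zero, so A silently drops that zero when a later number joins the subset, while B keeps it and returns the full subset, which is the intended partition. — e.g. on gen_disjoint_sets([0, 1]): A returns [[[[0], [0], [0]]], [[[0], [0], [0]], [[0], [0], [0]], [[0], [0], [0]]], [[[1], [0], [0]], [[0], [1], [0]], [[0], [0], …, B returns [[[[0], [0], [0]]], [[[0], [0], [0]], [[0], [0], [0]], [[0], [0], [0]]], [[[0, 1], [0], [0]], [[0], [1], [0]], [[0], [0…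
import Mathlib
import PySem

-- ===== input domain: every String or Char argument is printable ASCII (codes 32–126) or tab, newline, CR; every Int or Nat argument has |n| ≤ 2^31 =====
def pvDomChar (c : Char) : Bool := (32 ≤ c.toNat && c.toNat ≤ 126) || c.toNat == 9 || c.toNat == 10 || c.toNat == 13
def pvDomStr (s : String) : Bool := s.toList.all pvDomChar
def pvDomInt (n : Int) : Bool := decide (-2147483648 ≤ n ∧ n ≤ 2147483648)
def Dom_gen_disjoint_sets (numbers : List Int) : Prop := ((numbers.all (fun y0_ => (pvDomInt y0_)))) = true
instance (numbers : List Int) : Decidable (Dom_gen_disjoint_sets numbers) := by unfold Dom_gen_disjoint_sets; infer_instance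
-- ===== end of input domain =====

-- B enumerates each level directly from base-3 digits of the entry index instead of
-- copy-and-extending the previous level; B keeps a number zero in its subset where A's
-- empty-subset sentinel collides with it and drops it.

-- ===== PORT A =====
-- All Python index accesses (sets[i], sets[i][j//3], a[0..2], numbers[i]) use
-- nonnegative indices that are always in range, so List.getD is exact here.
def gen_disjoint_sets (numbers : List Int) : List (List (List (List Int))) :=
  (List.range numbers.length).foldl
    (fun sets i =>
      let prev := sets.getD i []
      let n := prev.length * 3
      let newLevel := (List.range n).foldl
        (fun acc j =>
          let p := prev.getD (j / 3) []
          let x := numbers.getD i 0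
          let modify := fun (c : List Int) => if c = [0] then [x] else c ++ [x]
          let a := if j % 3 = 0 then [modify (p.getD 0 []), p.getD 1 [], p.getD 2 []]
                   else if j % 3 = 1 then [p.getD 0 [], modify (p.getD 1 []), p.getD 2 []]
                   else [p.getD 0 [], p.getD 1 [], modify (p.getD 2 [])]
          acc ++ [a]) []
      sets ++ [newLevel])
    [[[[0], [0], [0]]]]

-- ===== PORT B =====
def gen_disjoint_sets_alt (numbers : List Int) : List (List (List (List Int))) :=
  (List.range (numbers.length + 1)).map (fun k =>
    (List.range (3 ^ k)).map (fun j =>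
      (List.range 3).map (fun s =>
        let subset := ((List.range k).filter (fun i => j / 3 ^ (k - 1 - i) % 3 = s)).map
          (fun i => numbers.getD i 0)
        if subset = [] then [0] else subset)))

-- ===== PRECONDITION & SPEC =====
-- On lists where 0 occurs before the last element, A's empty-subset sentinel collides with
-- a subset that actually contains the number zero, so A silently drops that zero when a
-- later number joins the subset, while B returns the full subset, the intended partition.
def D_gen_disjoint_sets (numbers : List Int) : Prop := (0 : Int) ∈ numbers.dropLast
instance (numbers : List Int) : Decidable (D_gen_disjoint_sets numbers) := by
  unfold D_gen_disjoint_sets; infer_instance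

def Spec_gen_disjoint_sets (numbers : List Int) (out : List (List (List (List Int)))) : Prop :=
  ¬ D_gen_disjoint_sets numbers → out = gen_disjoint_sets_alt numbers
instance (numbers : List Int) (out : List (List (List (List Int)))) :
    Decidable (Spec_gen_disjoint_sets numbers out) := by
  unfold Spec_gen_disjoint_sets; infer_instance

def pvDiffWitness_gen_disjoint_sets : List Int := [0, 1]
def pvDiffWitnessOut_gen_disjoint_sets :
    (List (List (List (List Int)))) × (List (List (List (List Int)))) :=
  ([[[[0], [0], [0]]],
    [[[0], [0], [0]], [[0], [0], [0]], [[0], [0], [0]]],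
    [[[1], [0], [0]], [[0], [1], [0]], [[0], [0], [1]],
     [[1], [0], [0]], [[0], [1], [0]], [[0], [0], [1]],
     [[1], [0], [0]], [[0], [1], [0]], [[0], [0], [1]]]],
   [[[[0], [0], [0]]],
    [[[0], [0], [0]], [[0], [0], [0]], [[0], [0], [0]]],
    [[[0, 1], [0], [0]], [[0], [1], [0]], [[0], [0], [1]],
     [[1], [0], [0]], [[0], [0, 1], [0]], [[0], [0], [1]],
     [[1], [0], [0]], [[0], [1], [0]], [[0], [0], [0, 1]]]])

-- ===== CLAIM (what is proved, stated in full; the proofs are below) =====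
def Claim_unchanged_gen_disjoint_sets : Prop := ∀ (numbers : List Int),
  Dom_gen_disjoint_sets numbers → Spec_gen_disjoint_sets numbers (gen_disjoint_sets numbers)
def Claim_changed_gen_disjoint_sets : Prop :=
  Dom_gen_disjoint_sets (pvDiffWitness_gen_disjoint_sets) ∧
  D_gen_disjoint_sets (pvDiffWitness_gen_disjoint_sets) ∧
  gen_disjoint_sets (pvDiffWitness_gen_disjoint_sets) = pvDiffWitnessOut_gen_disjoint_sets.1 ∧
  gen_disjoint_sets_alt (pvDiffWitness_gen_disjoint_sets) = pvDiffWitnessOut_gen_disjoint_sets.2 ∧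
  pvDiffWitnessOut_gen_disjoint_sets.1 ≠ pvDiffWitnessOut_gen_disjoint_sets.2

-- ===== LEMMAS AND PROOFS =====

-- proof-side names for B's pieces
def Bsub (numbers : List Int) (k j s : Nat) : List Int :=
  ((List.range k).filter (fun i => j / 3 ^ (k - 1 - i) % 3 = s)).map (fun i => numbers.getD i 0)

def Bg (numbers : List Int) (k j s : Nat) : List Int :=
  if Bsub numbers k j s = [] then [0] else Bsub numbers k j s

def Bent (numbers : List Int) (k j : Nat) : List (List Int) :=
  (List.range 3).map (Bg numbers k j)

def Blevel (numbers : List Int) (k : Nat) : List (List (List Int)) :=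
  (List.range (3 ^ k)).map (Bent numbers k)

lemma alt_eq (numbers : List Int) :
    gen_disjoint_sets_alt numbers = (List.range (numbers.length + 1)).map (Blevel numbers) := rfl

lemma Bent_eq (numbers : List Int) (k j : Nat) :
    Bent numbers k j = [Bg numbers k j 0, Bg numbers k j 1, Bg numbers k j 2] := rfl

lemma foldl_append_map {α β : Type} (f : α → β) :
    ∀ (l : List α) (acc : List β), l.foldl (fun a x => a ++ [f x]) acc = acc ++ l.map f := by
  intro l
  induction l with
  | nil => simp
  | cons x xs ih => intro acc; simp [List.foldl_cons, ih]

lemma digit_shift (k i j : Nat) (h : i < k) :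
    j / 3 ^ (k - i) = (j / 3) / 3 ^ (k - 1 - i) := by
  have hk : k - i = (k - 1 - i) + 1 := by omega
  rw [hk, pow_succ, Nat.mul_comm, ← Nat.div_div_eq_div_mul]

lemma Bsub_succ (numbers : List Int) (k j s : Nat) :
    Bsub numbers (k + 1) j s =
      Bsub numbers k (j / 3) s ++ (if j % 3 = s then [numbers.getD k 0] else []) := by
  unfold Bsub
  rw [List.range_succ, List.filter_append, List.map_append]
  congr 1
  · congr 1
    apply List.filter_congr
    intro i hi
    have hik : i < k := List.mem_range.mp hi
    have h1 : k + 1 - 1 - i = k - i := by omega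
    rw [h1, digit_shift k i j hik]
  · have h0 : k + 1 - 1 - k = 0 := by omega
    by_cases hs : j % 3 = s <;> simp [hs]

-- under the no-early-zero hypothesis, a built subset is never the sentinel [0]
lemma Bsub_ne_sentinel (numbers : List Int) (k j s : Nat)
    (hz : ∀ i, i < numbers.length - 1 → numbers.getD i 0 ≠ 0)
    (hk : k < numbers.length) : Bsub numbers k j s ≠ [0] := by
  intro hcon
  have h0 : (0 : Int) ∈ Bsub numbers k j s := by rw [hcon]; simp
  unfold Bsub at h0
  obtain ⟨i, hi, hval⟩ := List.mem_map.mp h0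
  have hik : i < k := List.mem_range.mp (List.mem_filter.mp hi).1
  exact hz i (by omega) hval

lemma Bg_succ (numbers : List Int) (k j s : Nat)
    (hz : ∀ i, i < numbers.length - 1 → numbers.getD i 0 ≠ 0)
    (hk : k < numbers.length) :
    Bg numbers (k + 1) j s =
      if j % 3 = s then
        (if Bg numbers k (j / 3) s = [0] then [numbers.getD k 0]
         else Bg numbers k (j / 3) s ++ [numbers.getD k 0])
      else Bg numbers k (j / 3) s := by
  by_cases hs : j % 3 = s
  · by_cases he : Bsub numbers k (j / 3) s = []
    · simp [Bg, Bsub_succ, hs, he]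
    · have hsent := Bsub_ne_sentinel numbers k (j / 3) s hz hk
      simp [Bg, Bsub_succ, hs, he, hsent]
  · simp [Bg, Bsub_succ, hs]

lemma Blevel_zero (numbers : List Int) : Blevel numbers 0 = [[[0], [0], [0]]] := by
  simp [Blevel, Bent]
  rfl

lemma Blevel_length (numbers : List Int) (k : Nat) : (Blevel numbers k).length = 3 ^ k := by
  simp [Blevel]

-- A's inner loop, fed with B's level k, produces B's level k+1
lemma step_level (numbers : List Int) (k : Nat)
    (hz : ∀ i, i < numbers.length - 1 → numbers.getD i 0 ≠ 0)
    (hk : k < numbers.length) :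
    (List.range ((Blevel numbers k).length * 3)).foldl
      (fun acc j =>
        let p := (Blevel numbers k).getD (j / 3) []
        let x := numbers.getD k 0
        let modify := fun (c : List Int) => if c = [0] then [x] else c ++ [x]
        let a := if j % 3 = 0 then [modify (p.getD 0 []), p.getD 1 [], p.getD 2 []]
                 else if j % 3 = 1 then [p.getD 0 [], modify (p.getD 1 []), p.getD 2 []]
                 else [p.getD 0 [], p.getD 1 [], modify (p.getD 2 [])]
        acc ++ [a]) [] = Blevel numbers (k + 1) := by
  rw [foldl_append_map]
  rw [List.nil_append, Blevel_length]
  have hn : 3 ^ k * 3 = 3 ^ (k + 1) := by rw [pow_succ]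
  rw [hn]
  unfold Blevel
  apply List.map_congr_left
  intro j hj
  have hjlt : j < 3 ^ (k + 1) := List.mem_range.mp hj
  have hdiv : j / 3 < 3 ^ k := by
    rw [Nat.div_lt_iff_lt_mul (by norm_num)]
    calc j < 3 ^ (k + 1) := hjlt
    _ = 3 ^ k * 3 := by rw [pow_succ]
  have hp : (List.map (Bent numbers k) (List.range (3 ^ k))).getD (j / 3) [] =
      Bent numbers k (j / 3) := by
    rw [List.getD_eq_getElem _ _ (by simpa using hdiv)]
    simp
  have hg := fun s => Bg_succ numbers k j s hz hk
  have hmod3 : j % 3 = 0 ∨ j % 3 = 1 ∨ j % 3 = 2 := by omega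
  dsimp only
  rw [hp, Bent_eq numbers (k + 1) j, hg 0, hg 1, hg 2]
  rcases hmod3 with h | h | h <;> simp [h, Bent_eq, List.getD]

-- the outer loop invariant
lemma outer_inv (numbers : List Int)
    (hz : ∀ i, i < numbers.length - 1 → numbers.getD i 0 ≠ 0) :
    ∀ m, m ≤ numbers.length →
      (List.range m).foldl
        (fun sets i =>
          let prev := sets.getD i []
          let n := prev.length * 3
          let newLevel := (List.range n).foldl
            (fun acc j =>
              let p := prev.getD (j / 3) []
              let x := numbers.getD i 0
              let modify := fun (c : List Int) => if c = [0] then [x] else c ++ [x]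
              let a := if j % 3 = 0 then [modify (p.getD 0 []), p.getD 1 [], p.getD 2 []]
                       else if j % 3 = 1 then [p.getD 0 [], modify (p.getD 1 []), p.getD 2 []]
                       else [p.getD 0 [], p.getD 1 [], modify (p.getD 2 [])]
              acc ++ [a]) []
          sets ++ [newLevel])
        [[[[0], [0], [0]]]] = (List.range (m + 1)).map (Blevel numbers) := by
  intro m
  induction m with
  | zero =>
    intro _
    simp [Blevel_zero]
  | succ m ih =>
    intro hm
    rw [List.range_succ, List.foldl_append, ih (by omega)]
    simp only [List.foldl_cons, List.foldl_nil]
    have hlen : ((List.range (m + 1)).map (Blevel numbers)).length = m + 1 := by simp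
    have hget : ((List.range (m + 1)).map (Blevel numbers)).getD m [] = Blevel numbers m := by
      rw [List.getD_eq_getElem _ _ (by rw [hlen]; omega)]
      simp
    simp only [hget]
    rw [step_level numbers m hz (by omega)]
    simp [List.range_succ]

lemma notD_imp_hz (numbers : List Int) (hD : ¬ D_gen_disjoint_sets numbers) :
    ∀ i, i < numbers.length - 1 → numbers.getD i 0 ≠ 0 := by
  intro i hi hval
  apply hD
  unfold D_gen_disjoint_sets
  have hlen : i < numbers.dropLast.length := by simp; omega
  have : numbers.dropLast[i] = numbers.getD i 0 := by
    rw [List.getElem_dropLast, List.getD_eq_getElem _ _ (by omega)]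
  rw [← hval, ← this]
  exact List.getElem_mem hlen

-- ===== VERDICT (by name: the statement is the Claim_ definition above) =====
theorem gen_disjoint_sets_spec : Claim_unchanged_gen_disjoint_sets := by
  intro numbers _ hD
  have hz := notD_imp_hz numbers hD
  show gen_disjoint_sets numbers = gen_disjoint_sets_alt numbers
  rw [alt_eq]
  exact outer_inv numbers hz numbers.length (le_refl _)

theorem gen_disjoint_sets_changed : Claim_changed_gen_disjoint_sets := by
  unfold Claim_changed_gen_disjoint_sets; decide
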